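-- pv_equiv track=rewrite | github.com/raeez/chiral-bar-cobar | compute/lib/lattice_genus2_theta.py | fundamental_discriminant
-- ===== SOURCE A (Python) =====
-- import math
-- from typing import Any, Dict, List, Optional, Tuple, Union
--
-- def _is_squarefree(n: int) -> bool:
--     """Check if n is squarefree."""
--     if n <= 1:
--         return True
--     d = 2
--     while d * d <= n:
--         if n % (d * d) == 0:
--             return False
--         d += 1
--     return True
--
-- def _is_fundamental_discriminant(D: int) -> bool:
--     """Check if D < 0 is a fundamental discriminant."""
--     if D >= 0:
--         return False
--     m = -D
--     if m % 4 == 3: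
--         return _is_squarefree(m)
--     if m % 4 == 0:
--         n = m // 4
--         if n % 4 in (1, 2, 3) and _is_squarefree(n):
--             return True
--     return False
--
-- def fundamental_discriminant(N: int) -> Tuple[int, int]:
--     r"""Factor N = |D_0| * f^2 with D_0 fundamental discriminant.
--
--     Returns (D_0, f) with D_0 < 0.
--     """
--     for f in range(int(math.sqrt(N)), 0, -1):
--         if N % (f * f) != 0:
--             continue
--         D0 = -(N // (f * f))
--         if _is_fundamental_discriminant(D0):
--             return (D0, f)
--     return (-N, 1)
-- ===== SOURCE B (Python) =====
-- def _is_squarefree(n: int) -> bool: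
--     """Check if n is squarefree."""
--     if n <= 1:
--         return True
--     d = 2
--     while d * d <= n:
--         if n % (d * d) == 0:
--             return False
--         d += 1
--     return True
--
-- def _is_fundamental_discriminant(D: int) -> bool:
--     """Check if D < 0 is a fundamental discriminant."""
--     if D >= 0:
--         return False
--     m = -D
--     if m % 4 == 3:
--         return _is_squarefree(m)
--     if m % 4 == 0:
--         n = m // 4
--         if n % 4 in (1, 2, 3) and _is_squarefree(n):
--             return True
--     return False
--
-- def fundamental_discriminant(N):
--     """Factor N = |D_0| * f^2 with D_0 fundamental discriminant.
--
--     Extract the full square part first (N = m * f * f with m squarefree),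
--     then the only candidates t with t*t | N are the divisors of f.
--     """
--     m, f, d = N, 1, 2
--     while d * d <= m:
--         if m % (d * d) == 0:
--             m //= d * d
--             f *= d
--         else:
--             d += 1
--     for t in range(f, 0, -1):
--         if f % t != 0:
--             continue
--         D0 = -(N // (t * t))
--         if _is_fundamental_discriminant(D0):
--             return (D0, t)
--     return (-N, 1)
-- ===== Notes on version B (the rewrite author's own statement) =====
-- stated objective: alternative
-- what changed: Instead of scanning every f in [1, isqrt(N)] for f^2 | N, B extracts the full square part in one trial-division pass (N = m * fmax^2 with m squarefree) and then tests only the divisors t of fmax, since those are exactly the t with t^2 | N.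
import Mathlib
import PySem

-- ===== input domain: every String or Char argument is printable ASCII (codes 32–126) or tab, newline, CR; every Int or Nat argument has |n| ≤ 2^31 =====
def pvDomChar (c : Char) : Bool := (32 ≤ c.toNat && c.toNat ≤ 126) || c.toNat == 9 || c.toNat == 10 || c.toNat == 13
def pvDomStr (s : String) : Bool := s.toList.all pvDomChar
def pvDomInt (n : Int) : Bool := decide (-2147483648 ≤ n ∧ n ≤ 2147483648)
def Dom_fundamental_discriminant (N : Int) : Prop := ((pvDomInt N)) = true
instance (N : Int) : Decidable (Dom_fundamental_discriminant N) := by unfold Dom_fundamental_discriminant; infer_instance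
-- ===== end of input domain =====

-- B replaces A's scan of every f in [1, isqrt(N)] by one square-extraction pass N = m*f_max^2
-- (m squarefree), after which only the divisors of f_max are tested (objective: alternative).

-- ===== PORT A =====
-- helper _is_squarefree: the 'while d * d <= n' loop
def isSquarefreeAux (n d : Int) : Bool :=
  if _h : d * d ≤ n then
    if PySem.Int.mod n (d * d) == 0 then false
    else isSquarefreeAux n (d + 1)
  else true
termination_by (n + 2 - d).toNat
decreasing_by
  have : d - 1 ≤ d * d := by nlinarith [sq_nonneg d, sq_nonneg (d - 1)]
  omega

def isSquarefree (n : Int) : Bool :=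
  if n ≤ 1 then true else isSquarefreeAux n 2

def isFundamentalDiscriminant (D : Int) : Bool :=
  if 0 ≤ D then false
  else
    let m := -D
    if PySem.Int.mod m 4 == 3 then isSquarefree m
    else if PySem.Int.mod m 4 == 0 then
      let n := PySem.Int.floordiv m 4
      if (PySem.Int.mod n 4 == 1 || PySem.Int.mod n 4 == 2 || PySem.Int.mod n 4 == 3)
          && isSquarefree n then true
      else false
    else false

-- A's 'for f in range(int(math.sqrt(N)), 0, -1)' loop
def fdLoopA (N f : Int) : Int × Int :=
  if _h : 1 ≤ f then
    if PySem.Int.mod N (f * f) ≠ 0 then fdLoopA N (f - 1)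
    else
      let D0 := -(PySem.Int.floordiv N (f * f))
      if isFundamentalDiscriminant D0 then (D0, f) else fdLoopA N (f - 1)
  else (-N, 1)
termination_by f.toNat
decreasing_by all_goals omega

-- int(math.sqrt(N)) = Nat.sqrt N.toNat: exact on Pre_ (0 ≤ N ≤ 2^31 < 2^52, double sqrt correctly rounded)
def fundamental_discriminant (N : Int) : Int × Int :=
  fdLoopA N (Int.ofNat (Nat.sqrt N.toNat))

-- ===== PORT B =====
-- B's square-extraction loop: 'while d*d <= m: if m % (d*d) == 0: m //= d*d; f *= d else: d += 1'
-- (the '2 ≤ d' guard only makes the recursion total; Source B starts at d = 2 and never decreases d)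
def extractSquare (m f d : Int) : Int × Int :=
  if _h2 : 2 ≤ d then
    if _h : d * d ≤ m then
      if PySem.Int.mod m (d * d) == 0 then
        extractSquare (PySem.Int.floordiv m (d * d)) (f * d) d
      else extractSquare m f (d + 1)
    else (m, f)
  else (m, f)
termination_by (m.toNat, (m + 2 - d).toNat)
decreasing_by
  · left
    have h4 : (4 : Int) ≤ d * d := by nlinarith
    have hm : 0 < m := by omega
    have he := PySem.Int.floordiv_eq_ediv_of_pos (a := m) (b := d * d) (by omega)
    have h1 : m / (d * d) < m := Int.ediv_lt_of_lt_mul (by omega) (by nlinarith)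
    have h2' : 0 ≤ m / (d * d) := Int.ediv_nonneg (by omega) (by omega)
    rw [he]; omega
  · right
    have : d ≤ d * d := by nlinarith
    omega

-- B's 'for t in range(f, 0, -1)' loop
def fdLoopB (N f t : Int) : Int × Int :=
  if _h : 1 ≤ t then
    if PySem.Int.mod f t ≠ 0 then fdLoopB N f (t - 1)
    else
      let D0 := -(PySem.Int.floordiv N (t * t))
      if isFundamentalDiscriminant D0 then (D0, t) else fdLoopB N f (t - 1)
  else (-N, 1)
termination_by t.toNat
decreasing_by all_goals omega

def fundamental_discriminant_alt (N : Int) : Int × Int :=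
  let p := extractSquare N 1 2
  fdLoopB N p.2 p.2

-- ===== PRECONDITION & SPEC =====
-- Pre_ excludes negative N, where A raises ValueError (math.sqrt of a negative number).
def Pre_fundamental_discriminant (N : Int) : Prop := 0 ≤ N
instance (N : Int) : Decidable (Pre_fundamental_discriminant N) := by
  unfold Pre_fundamental_discriminant; infer_instance

def pvWitness_fundamental_discriminant : Int := 12

def Spec_fundamental_discriminant (N : Int) (out : Int × Int) : Prop := out = fundamental_discriminant_alt N
instance (N : Int) (out : Int × Int) : Decidable (Spec_fundamental_discriminant N out) := by
  unfold Spec_fundamental_discriminant; infer_instance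

-- ===== CLAIM (what is proved, stated in full; the proofs are below) =====
def Claim_equal_fundamental_discriminant : Prop := ∀ (N : Int), Dom_fundamental_discriminant N → Pre_fundamental_discriminant N → Spec_fundamental_discriminant N (fundamental_discriminant N)

-- ===== LEMMAS AND PROOFS =====

theorem extractSquare_decomp (m f d : Int) (hd : 2 ≤ d) (hm : 1 ≤ m) :
    ∃ k : Int, 1 ≤ k ∧ (extractSquare m f d).1 * (k * k) = m ∧
      (extractSquare m f d).2 = f * k ∧ 1 ≤ (extractSquare m f d).1 := by
  fun_induction extractSquare m f d with
  | case1 m f d h2 h hdvd ih =>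
    have hdd : (4 : Int) ≤ d * d := by nlinarith
    have hdvd' : d * d ∣ m := (PySem.Int.mod_eq_zero_iff_dvd m (d * d)).mp (by simpa using hdvd)
    have he := PySem.Int.floordiv_eq_ediv_of_pos (a := m) (b := d * d) (by omega)
    have hq1 : 1 ≤ PySem.Int.floordiv m (d * d) := by
      rw [he]; exact Int.le_ediv_iff_mul_le (by omega) |>.mpr (by omega)
    obtain ⟨k, hk1, hkm, hkf, hres⟩ := ih hd hq1
    refine ⟨d * k, by nlinarith, ?_, by rw [hkf]; ring, hres⟩
    have hcancel : PySem.Int.floordiv m (d * d) * (d * d) = m := by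
      rw [he]; exact Int.ediv_mul_cancel hdvd'
    calc (extractSquare (PySem.Int.floordiv m (d * d)) (f * d) d).1 * (d * k * (d * k))
        = (extractSquare (PySem.Int.floordiv m (d * d)) (f * d) d).1 * (k * k) * (d * d) := by
          ring
      _ = PySem.Int.floordiv m (d * d) * (d * d) := by rw [hkm]
      _ = m := hcancel
  | case2 m f d h2 h hdvd ih =>
    obtain ⟨k, hk1, hkm, hkf, hres⟩ := ih (by omega) hm
    exact ⟨k, hk1, hkm, hkf, hres⟩
  | case3 m f d h2 h =>
    exact ⟨1, le_refl 1, by simp, by simp, by simpa using hm⟩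
  | case4 m f d h2 =>
    exact ⟨1, le_refl 1, by simp, by simp, by simpa using hm⟩

theorem extractSquare_squarefree (m f d : Int) (hd : 2 ≤ d) (hm : 1 ≤ m)
    (hprev : ∀ e : Int, 2 ≤ e → e < d → ¬ (e * e ∣ m)) :
    ∀ e : Int, 2 ≤ e → ¬ (e * e ∣ (extractSquare m f d).1) := by
  fun_induction extractSquare m f d with
  | case1 m f d h2 h hdvd ih =>
    have hdvd' : d * d ∣ m := (PySem.Int.mod_eq_zero_iff_dvd m (d * d)).mp (by simpa using hdvd)
    have he := PySem.Int.floordiv_eq_ediv_of_pos (a := m) (b := d * d) (by nlinarith)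
    have hq1 : 1 ≤ PySem.Int.floordiv m (d * d) := by
      rw [he]; exact Int.le_ediv_iff_mul_le (by nlinarith) |>.mpr (by nlinarith)
    have hqdvd : PySem.Int.floordiv m (d * d) ∣ m := by
      rw [he]; exact ⟨d * d, (Int.ediv_mul_cancel hdvd').symm⟩
    exact ih hd hq1 (fun e he2 hed hdv => hprev e he2 hed (hdv.trans hqdvd))
  | case2 m f d h2 h hdvd ih =>
    refine ih (by omega) hm (fun e he2 hed => ?_)
    rcases lt_or_eq_of_le (by omega : e ≤ d) with hlt | heq
    · exact hprev e he2 hlt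
    · subst heq
      intro hc
      exact absurd ((PySem.Int.mod_eq_zero_iff_dvd m (e * e)).mpr hc) (by simpa using hdvd)
  | case3 m f d h2 h =>
    intro e he2 hc
    simp only at hc
    rcases Int.lt_or_le e d with hlt | hge
    · exact hprev e he2 hlt hc
    · have : e * e ≤ m := Int.le_of_dvd (by omega) hc
      nlinarith
  | case4 m f d h2 => omega

-- number-theoretic core: a² ∣ c·b² with c squarefree forces a ∣ b
theorem sq_dvd_mul_sq (a b c : Nat) (ha : a ≠ 0) (hb : b ≠ 0) (hc : c ≠ 0)
    (hsf : Squarefree c) (h : a * a ∣ c * (b * b)) : a ∣ b := by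
  rw [← Nat.factorization_le_iff_dvd ha hb]
  intro p
  have hle := (Nat.factorization_le_iff_dvd (by positivity) (by positivity)).mpr h p
  rw [Nat.factorization_mul ha ha, Nat.factorization_mul hc (by positivity),
    Nat.factorization_mul hb hb] at hle
  simp only [Finsupp.coe_add, Pi.add_apply] at hle
  have h1 : c.factorization p ≤ 1 := hsf.natFactorization_le_one p
  omega

theorem int_squarefree_toNat (m : Int) (hm : 1 ≤ m)
    (hsf : ∀ e : Int, 2 ≤ e → ¬ (e * e ∣ m)) : Squarefree m.toNat := by
  rw [Nat.squarefree_iff_prime_squarefree]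
  intro p hp hdvd
  have h2 : 2 ≤ p := hp.two_le
  have hdvd' : ((p : Int) * (p : Int)) ∣ m := by
    have := Int.natCast_dvd_natCast.mpr hdvd
    push_cast at this
    rwa [Int.toNat_of_nonneg (by omega)] at this
  exact hsf p (by exact_mod_cast h2) hdvd'

-- t² ∣ N ↔ t ∣ f, given the square-extraction decomposition N = m·f² with m squarefree
theorem key_iff (N m f : Int) (hN : 1 ≤ N) (hm : 1 ≤ m) (hf : 1 ≤ f)
    (hdec : m * (f * f) = N) (hsf : ∀ e : Int, 2 ≤ e → ¬ (e * e ∣ m)) :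
    ∀ t : Int, 1 ≤ t → ((t * t ∣ N) ↔ t ∣ f) := by
  intro t ht
  constructor
  · intro hdvd
    have hsfn : Squarefree m.toNat := int_squarefree_toNat m hm hsf
    have hnat : t.toNat * t.toNat ∣ m.toNat * (f.toNat * f.toNat) := by
      rw [← Int.natCast_dvd_natCast]
      push_cast
      rw [Int.toNat_of_nonneg (by omega), Int.toNat_of_nonneg (by omega),
        Int.toNat_of_nonneg (by omega)]
      rwa [hdec]
    have hdn := sq_dvd_mul_sq t.toNat f.toNat m.toNat (by omega) (by omega) (by omega) hsfn hnat
    have hdi := Int.natCast_dvd_natCast.mpr hdn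
    rwa [Int.toNat_of_nonneg (by omega), Int.toNat_of_nonneg (by omega)] at hdi
  · rintro ⟨c, rfl⟩
    exact ⟨m * (c * c), by rw [← hdec]; ring⟩

-- A skips every f in (f_max, isqrt N]: no such f has f² ∣ N
theorem fdLoopA_skip (N f : Int) (hf : 1 ≤ f)
    (hkey : ∀ t : Int, 1 ≤ t → ((t * t ∣ N) ↔ t ∣ f)) :
    ∀ j : Nat, fdLoopA N (f + j) = fdLoopA N f := by
  intro j
  induction j with
  | zero => simp
  | succ j ih =>
    have ht : (1 : Int) ≤ f + ((j + 1 : Nat) : Int) := by push_cast; omega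
    have hnd : PySem.Int.mod N ((f + ((j + 1 : Nat) : Int)) * (f + ((j + 1 : Nat) : Int))) ≠ 0 := by
      intro hc
      have hdvd := (PySem.Int.mod_eq_zero_iff_dvd N _).mp hc
      have h2 := (hkey (f + ((j + 1 : Nat) : Int)) (by push_cast; omega)).mp hdvd
      have h3 := Int.le_of_dvd (by omega) h2
      push_cast at h3; omega
    rw [fdLoopA, dif_pos ht, if_pos hnd]
    have heq : f + ((j + 1 : Nat) : Int) - 1 = f + (j : Nat) := by push_cast; ring
    rw [heq, ih]

-- on t ≤ f_max the two loops take the same branches (t² ∣ N ↔ t ∣ f_max)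
theorem fdLoopA_agree (N f : Int) (hN : 1 ≤ N) (hf : 1 ≤ f)
    (hkey : ∀ t : Int, 1 ≤ t → ((t * t ∣ N) ↔ t ∣ f)) :
    ∀ n : Nat, ∀ t : Int, t.toNat = n → t ≤ f → fdLoopA N t = fdLoopB N f t := by
  intro n
  induction n with
  | zero =>
    intro t htn htf
    rw [fdLoopA, fdLoopB, dif_neg (by omega), dif_neg (by omega)]
  | succ n ih =>
    intro t htn htf
    have ht1 : 1 ≤ t := by omega
    have hcond : (PySem.Int.mod N (t * t) ≠ 0) ↔ (PySem.Int.mod f t ≠ 0) := by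
      rw [not_iff_not, PySem.Int.mod_eq_zero_iff_dvd, PySem.Int.mod_eq_zero_iff_dvd]
      exact hkey t ht1
    rw [fdLoopA, fdLoopB, dif_pos ht1, dif_pos ht1]
    by_cases hc : PySem.Int.mod f t ≠ 0
    · rw [if_pos (hcond.mpr hc), if_pos hc]
      exact ih (t - 1) (by omega) (by omega)
    · rw [if_neg (fun hx => hc (hcond.mp hx)), if_neg hc]
      by_cases hfd : isFundamentalDiscriminant (-(PySem.Int.floordiv N (t * t))) = true
      · simp only [hfd, if_true]
      · simp only [hfd, if_false]
        exact ih (t - 1) (by omega) (by omega)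

-- ===== VERDICT (by name: the statement is the Claim_ definition above) =====
theorem fundamental_discriminant_spec : Claim_equal_fundamental_discriminant := by
  intro N _hdom hpre
  unfold Spec_fundamental_discriminant
  rcases eq_or_lt_of_le (hpre : (0 : Int) ≤ N) with hz | hpos
  · rw [← hz]
    show fundamental_discriminant 0 = fundamental_discriminant_alt 0
    rw [fundamental_discriminant, fundamental_discriminant_alt]
    have e1 : extractSquare 0 1 2 = (0, 1) := by
      rw [extractSquare, dif_pos (by norm_num : (2:Int) ≤ 2), dif_neg (by norm_num : ¬ ((2:Int) * 2 ≤ 0))]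
    have e2 : fdLoopB 0 1 0 = ((0 : Int), (1 : Int)) := by
      rw [fdLoopB, dif_neg (by norm_num : ¬ ((1:Int) ≤ 0))]; norm_num
    have e3 : fdLoopB 0 1 1 = ((0 : Int), (1 : Int)) := by
      rw [fdLoopB, dif_pos (by norm_num : (1:Int) ≤ 1)]
      norm_num [show (PySem.Int.mod (1:Int) 1) = 0 from by decide,
        show isFundamentalDiscriminant (-(PySem.Int.floordiv (0:Int) (1 * 1))) = false from by decide,
        e2]
    have e4 : fdLoopA 0 (Int.ofNat (Nat.sqrt (Int.toNat 0))) = ((0 : Int), (1 : Int)) := by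
      rw [show Int.ofNat (Nat.sqrt (Int.toNat 0)) = (0 : Int) from by decide]
      rw [fdLoopA, dif_neg (by norm_num : ¬ ((1:Int) ≤ 0))]; norm_num
    rw [e1, e4]
    simp only []
    rw [e3]
  · have hN : (1 : Int) ≤ N := hpos
    obtain ⟨k, hk1, hkm, hkf, hm1⟩ := extractSquare_decomp N 1 2 (le_refl 2) hN
    have hsf := extractSquare_squarefree N 1 2 (le_refl 2) hN (fun e he2 hlt => by omega)
    set E := extractSquare N 1 2 with hE
    have hf1 : 1 ≤ E.2 := by rw [hkf]; omega
    have hdec : E.1 * (E.2 * E.2) = N := by rw [hkf]; simpa [one_mul, hkf] using hkm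
    have hkey := key_iff N E.1 E.2 hN hm1 hf1 hdec hsf
    have hffN : E.2 * E.2 ∣ N := (hkey E.2 hf1).mpr dvd_rfl
    have hle : E.2 * E.2 ≤ N := Int.le_of_dvd (by omega) hffN
    have hfs : E.2.toNat ≤ Nat.sqrt N.toNat := by
      rw [Nat.le_sqrt]
      have hc : (E.2.toNat * E.2.toNat : Int) ≤ (N.toNat : Int) := by
        push_cast
        rw [Int.toNat_of_nonneg (by omega), Int.toNat_of_nonneg (by omega)]
        exact hle
      exact_mod_cast hc
    have hsplit : (Int.ofNat (Nat.sqrt N.toNat)) = E.2 + ((Nat.sqrt N.toNat - E.2.toNat : Nat) : Int) := by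
      simp only [Int.ofNat_eq_natCast]
      omega
    show fundamental_discriminant N = fundamental_discriminant_alt N
    rw [fundamental_discriminant, fundamental_discriminant_alt]
    rw [hsplit, fdLoopA_skip N E.2 hf1 hkey, fdLoopA_agree N E.2 hN hf1 hkey E.2.toNat E.2 rfl le_rfl]
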